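-- pv_equiv track=rewrite | github.com/ray-project/ray | python/ray/tests/test_gpu_provider_on_gpu.py | _find_process_info
-- ===== SOURCE A (Python) =====
-- def _find_process_info(gpu_utilization, candidate_pids, tensor_size_mb):
--     fallback_match = None
--
--     for single_gpu_info in gpu_utilization:
--         procs = single_gpu_info["processes_pids"] or {}
--         for pid in candidate_pids:
--             if pid in procs:
--                 return single_gpu_info, procs[pid]
--
--         for process_info in procs.values():
--             if process_info["gpu_memory_usage"] >= tensor_size_mb:
--                 if (
--                     fallback_match is None
--                     or process_info["gpu_memory_usage"]
--                     < fallback_match[1]["gpu_memory_usage"]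
--                 ):
--                     fallback_match = (single_gpu_info, process_info)
--
--     return fallback_match
-- ===== SOURCE B (Python) =====
-- def _find_process_info(gpu_utilization, candidate_pids, tensor_size_mb):
--     # pass 1: direct pid match, first GPU then first candidate pid wins
--     for gpu in gpu_utilization:
--         procs = gpu["processes_pids"] or {}
--         for pid in candidate_pids:
--             if pid in procs:
--                 return gpu, procs[pid]
--     # pass 2: smallest sufficiently-large process across all GPUs (first minimum wins)
--     return min(
--         (
--             (gpu, proc)
--             for gpu in gpu_utilization
--             for proc in (gpu["processes_pids"] or {}).values()
--             if proc["gpu_memory_usage"] >= tensor_size_mb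
--         ),
--         key=lambda t: t[1]["gpu_memory_usage"],
--         default=None,
--     )
-- ===== Notes on version B (the rewrite author's own statement) =====
-- stated objective: simpler
-- what changed: A's single interleaved loop with an early return and a running strict-< fallback accumulator is split into two shaped passes: a pure pid-match scan, then min() with key and default=None over the flattened list of qualifying (gpu, proc) pairs.
import Mathlib
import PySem

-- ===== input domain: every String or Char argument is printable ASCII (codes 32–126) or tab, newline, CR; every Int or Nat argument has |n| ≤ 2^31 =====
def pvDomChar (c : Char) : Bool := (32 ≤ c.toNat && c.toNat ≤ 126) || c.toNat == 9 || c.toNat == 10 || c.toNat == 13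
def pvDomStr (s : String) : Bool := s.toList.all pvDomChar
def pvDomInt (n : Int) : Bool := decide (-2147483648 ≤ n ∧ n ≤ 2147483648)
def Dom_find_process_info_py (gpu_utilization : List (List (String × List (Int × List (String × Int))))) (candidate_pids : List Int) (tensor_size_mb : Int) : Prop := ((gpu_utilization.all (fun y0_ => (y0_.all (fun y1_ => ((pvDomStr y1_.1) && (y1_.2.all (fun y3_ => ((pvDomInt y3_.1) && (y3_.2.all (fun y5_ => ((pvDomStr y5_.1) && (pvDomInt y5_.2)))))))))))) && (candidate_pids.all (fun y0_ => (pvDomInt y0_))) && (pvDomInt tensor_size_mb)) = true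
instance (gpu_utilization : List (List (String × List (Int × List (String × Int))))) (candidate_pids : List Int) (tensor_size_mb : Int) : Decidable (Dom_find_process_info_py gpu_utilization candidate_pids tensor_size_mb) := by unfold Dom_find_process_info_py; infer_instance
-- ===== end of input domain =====

-- B replaces A's single interleaved loop (early return + running fallback accumulator) by two
-- shaped passes: a pure pid-match pass, then a min() over the flattened list of qualifying
-- processes; objective: simpler.  (A mutates nothing; equivalence is about the return value.)

-- ===== PORT A =====

-- A-side helper: 'for pid in candidate_pids: if pid in procs: return single_gpu_info, procs[pid]'
def pvFindPid (procs : List (Int × List (String × Int))) (pids : List Int) : Option (List (String × Int)) :=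
  match pids with
  | [] => none
  | pid :: rest =>
    match procs.lookup pid with   -- 'pid in procs' + 'procs[pid]' (first-match lookup, unique keys)
    | some v => some v
    | none => pvFindPid procs rest

-- A's fallback update: the body of 'for process_info in procs.values(): …'
def pvUpdA (tensor_size_mb : Int) (g : List (String × List (Int × List (String × Int))))
    (fb : Option ((List (String × List (Int × List (String × Int)))) × (List (String × Int))))
    (p : List (String × Int)) :
    Option ((List (String × List (Int × List (String × Int)))) × (List (String × Int))) :=
  if (p.lookup "gpu_memory_usage").getD 0 ≥ tensor_size_mb then
    match fb with
    | none => some (g, p)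
    | some fm =>
      if (p.lookup "gpu_memory_usage").getD 0 < (fm.2.lookup "gpu_memory_usage").getD 0 then
        some (g, p)
      else fb
  else fb

-- A's main loop, carrying 'fallback_match'
def pvLoopA (gpus : List (List (String × List (Int × List (String × Int))))) (candidate_pids : List Int)
    (tensor_size_mb : Int)
    (fb : Option ((List (String × List (Int × List (String × Int)))) × (List (String × Int)))) :
    Option ((List (String × List (Int × List (String × Int)))) × (List (String × Int))) :=
  match gpus with
  | [] => fb
  | g :: rest =>
    let procs := (g.lookup "processes_pids").getD []   -- g["processes_pids"] or {} (Pre_ requires the key)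
    match pvFindPid procs candidate_pids with
    | some v => some (g, v)
    | none => pvLoopA rest candidate_pids tensor_size_mb ((procs.map (·.2)).foldl (pvUpdA tensor_size_mb g) fb)

def find_process_info_py (gpu_utilization : List (List (String × List (Int × List (String × Int))))) (candidate_pids : List Int) (tensor_size_mb : Int) : Option ((List (String × List (Int × List (String × Int)))) × (List (String × Int))) :=
  pvLoopA gpu_utilization candidate_pids tensor_size_mb none

-- ===== PORT B =====

-- B pass 1: first GPU with a candidate-pid hit
def pvPidPass (gpus : List (List (String × List (Int × List (String × Int))))) (candidate_pids : List Int) :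
    Option ((List (String × List (Int × List (String × Int)))) × (List (String × Int))) :=
  match gpus with
  | [] => none
  | g :: rest =>
    match pvFindPid ((g.lookup "processes_pids").getD []) candidate_pids with
    | some v => some (g, v)
    | none => pvPidPass rest candidate_pids

-- B pass 2 generator: the flattened list of (gpu, proc) with enough memory
def pvCandidates (gpus : List (List (String × List (Int × List (String × Int))))) (tensor_size_mb : Int) :
    List ((List (String × List (Int × List (String × Int)))) × (List (String × Int))) :=
  gpus.flatMap (fun g =>
    ((((g.lookup "processes_pids").getD []).map (·.2)).filter
        (fun p => (p.lookup "gpu_memory_usage").getD 0 ≥ tensor_size_mb)).map (fun p => (g, p)))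

-- Python's min(iterable, key=…, default=None): first minimum, None on empty
def pvMinBy {α : Type} (key : α → Int) : List α → Option α
  | [] => none
  | x :: xs => some (xs.foldl (fun best y => if key y < key best then y else best) x)

def find_process_info_py_alt (gpu_utilization : List (List (String × List (Int × List (String × Int))))) (candidate_pids : List Int) (tensor_size_mb : Int) : Option ((List (String × List (Int × List (String × Int)))) × (List (String × Int))) :=
  match pvPidPass gpu_utilization candidate_pids with
  | some r => some r
  | none => pvMinBy (fun r => (r.2.lookup "gpu_memory_usage").getD 0)
              (pvCandidates gpu_utilization tensor_size_mb)

-- ===== PRECONDITION & SPEC =====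
-- Pre_ excludes exactly the inputs on which Python raises KeyError: a GPU dict reached before any
-- candidate-pid hit must carry "processes_pids", and, if it has no pid hit itself, each of its
-- process dicts must carry "gpu_memory_usage" (records past the first pid hit are never touched).
def pvWfKey (g : List (String × List (Int × List (String × Int)))) : Prop :=
  "processes_pids" ∈ g.map (·.1)
def pvHasHit (candidate_pids : List Int) (g : List (String × List (Int × List (String × Int)))) : Prop :=
  pvWfKey g ∧ ∃ pid ∈ candidate_pids, (((g.lookup "processes_pids").getD []).lookup pid).isSome
def pvWfProcs (g : List (String × List (Int × List (String × Int)))) : Prop :=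
  ∀ p ∈ ((g.lookup "processes_pids").getD []).map (·.2), "gpu_memory_usage" ∈ p.map (·.1)
def Pre_find_process_info_py (gpu_utilization : List (List (String × List (Int × List (String × Int))))) (candidate_pids : List Int) (tensor_size_mb : Int) : Prop :=
  ∀ (i : Nat) (h : i < gpu_utilization.length),
    (∀ g ∈ gpu_utilization.take i, ¬ pvHasHit candidate_pids g) →
    (pvHasHit candidate_pids gpu_utilization[i] ∨
      (pvWfKey gpu_utilization[i] ∧ pvWfProcs gpu_utilization[i]))
instance (gpu_utilization : List (List (String × List (Int × List (String × Int))))) (candidate_pids : List Int) (tensor_size_mb : Int) : Decidable (Pre_find_process_info_py gpu_utilization candidate_pids tensor_size_mb) := by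
  unfold Pre_find_process_info_py pvHasHit pvWfKey pvWfProcs
  exact Nat.decidableBallLT _ _

def pvWitness_find_process_info_py : (List (List (String × List (Int × List (String × Int))))) × List Int × Int :=
  ([[("processes_pids", [(7, [("gpu_memory_usage", 3)])])]], [5], 2)

def Spec_find_process_info_py (gpu_utilization : List (List (String × List (Int × List (String × Int))))) (candidate_pids : List Int) (tensor_size_mb : Int) (out : Option ((List (String × List (Int × List (String × Int)))) × (List (String × Int)))) : Prop := out = find_process_info_py_alt gpu_utilization candidate_pids tensor_size_mb
instance (gpu_utilization : List (List (String × List (Int × List (String × Int))))) (candidate_pids : List Int) (tensor_size_mb : Int) (out : Option ((List (String × List (Int × List (String × Int)))) × (List (String × Int)))) : Decidable (Spec_find_process_info_py gpu_utilization candidate_pids tensor_size_mb out) := by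
  unfold Spec_find_process_info_py
  have d1 : DecidableEq (String × List (Int × List (String × Int))) := inferInstance
  have d2 : DecidableEq (List (String × List (Int × List (String × Int)))) := @instDecidableEqList _ d1
  infer_instance

-- ===== CLAIM (what is proved, stated in full; the proofs are below) =====
def Claim_equal_find_process_info_py : Prop := ∀ (gpu_utilization : List (List (String × List (Int × List (String × Int))))) (candidate_pids : List Int) (tensor_size_mb : Int), Dom_find_process_info_py gpu_utilization candidate_pids tensor_size_mb → Pre_find_process_info_py gpu_utilization candidate_pids tensor_size_mb → Spec_find_process_info_py gpu_utilization candidate_pids tensor_size_mb (find_process_info_py gpu_utilization candidate_pids tensor_size_mb)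

-- ===== LEMMAS AND PROOFS =====

-- B's strict-< min step on an Option accumulator (what A's fallback update becomes after filtering)
def pvUpdMin {α : Type} (key : α → Int) (fb : Option α) (c : α) : Option α :=
  match fb with
  | none => some c
  | some fm => if key c < key fm then some c else fb

theorem pvUpdA_eq (t : Int) (g : List (String × List (Int × List (String × Int)))) (fb : _) (p : List (String × Int)) :
    pvUpdA t g fb p =
      if (p.lookup "gpu_memory_usage").getD 0 ≥ t then
        pvUpdMin (fun r => (r.2.lookup "gpu_memory_usage").getD 0) fb (g, p)
      else fb := by
  cases fb <;> simp [pvUpdA, pvUpdMin]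

-- the per-GPU fold over all procs equals the pvUpdMin-fold over the filtered, mapped candidates
theorem pvFold_gpu_eq (t : Int) (g : List (String × List (Int × List (String × Int))))
    (ps : List (List (String × Int))) (fb : _) :
    ps.foldl (pvUpdA t g) fb =
      ((ps.filter (fun p => (p.lookup "gpu_memory_usage").getD 0 ≥ t)).map (fun p => (g, p))).foldl
        (pvUpdMin (fun r => (r.2.lookup "gpu_memory_usage").getD 0)) fb := by
  induction ps generalizing fb with
  | nil => rfl
  | cons p ps ih =>
    simp only [List.foldl_cons, List.filter_cons]
    rw [pvUpdA_eq]
    by_cases h : (p.lookup "gpu_memory_usage").getD 0 ≥ t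
    · simp [h, ih]
    · simp [h, ih]

-- the fold of pvUpdMin starting from some x is Python's min loop
theorem pvFoldMin_some {α : Type} (key : α → Int) (x : α) (xs : List α) :
    xs.foldl (pvUpdMin key) (some x) = some (xs.foldl (fun best y => if key y < key best then y else best) x) := by
  induction xs generalizing x with
  | nil => rfl
  | cons y ys ih =>
    simp only [List.foldl_cons, pvUpdMin]
    by_cases h : key y < key x <;> simp [h, ih]

theorem pvFoldMin_none {α : Type} (key : α → Int) (xs : List α) :
    xs.foldl (pvUpdMin key) none = pvMinBy key xs := by
  cases xs with
  | nil => rfl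
  | cons x xs => simpa [pvMinBy, pvUpdMin] using pvFoldMin_some key x xs

-- main invariant: A's loop with accumulator fb = pid pass, else min-fold of fb over the candidates
theorem pvLoopA_eq (gpus : List (List (String × List (Int × List (String × Int))))) (pids : List Int)
    (t : Int) (fb : _) :
    pvLoopA gpus pids t fb =
      match pvPidPass gpus pids with
      | some r => some r
      | none => (pvCandidates gpus t).foldl (pvUpdMin (fun r => (r.2.lookup "gpu_memory_usage").getD 0)) fb := by
  induction gpus generalizing fb with
  | nil => rfl
  | cons g rest ih =>
    rw [pvLoopA, pvPidPass]
    cases hf : pvFindPid ((g.lookup "processes_pids").getD []) pids with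
    | some v => simp
    | none =>
      simp only [ih, pvCandidates, List.flatMap_cons, List.foldl_append, pvFold_gpu_eq]

theorem pv_main (gpus : List (List (String × List (Int × List (String × Int))))) (pids : List Int) (t : Int) :
    find_process_info_py gpus pids t = find_process_info_py_alt gpus pids t := by
  unfold find_process_info_py find_process_info_py_alt
  rw [pvLoopA_eq]
  cases pvPidPass gpus pids with
  | some r => rfl
  | none => simp [pvFoldMin_none]

-- ===== VERDICT (by name: the statement is the Claim_ definition above) =====
theorem find_process_info_py_spec : Claim_equal_find_process_info_py := by
  intro gpus pids t _ _
  unfold Spec_find_process_info_py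
  exact pv_main gpus pids t
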